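-- pv_equiv track=rewrite | github.com/pypi-data/pypi-mirror-397 | packages/carlib/carlib-1.3.31-py3-none-any.whl/carlib/evaluation/benchmark.py | get_gpu_assignments
-- ===== SOURCE A (Python) =====
-- from typing import Dict, List, Tuple, Any, Optional
--
-- def get_gpu_assignments(num_workers: int, available_gpus: int) -> List[int]:
--     """
--     Assign GPU device IDs to workers (legacy function for backward compatibility)
--
--     Args:
--         num_workers: Number of parallel workers requested
--         available_gpus: Number of available GPUs
--
--     Returns:
--         List of GPU device IDs for each worker
--     """
--     if available_gpus == 0:
--         return [None] * num_workers  # CPU processing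
--
--     # Distribute workers across available GPUs
--     gpu_assignments = []
--     for i in range(num_workers):
--         gpu_id = i % available_gpus
--         gpu_assignments.append(gpu_id)
--
--     return gpu_assignments
-- ===== SOURCE B (Python) =====
-- def get_gpu_assignments(num_workers, available_gpus):
--     if available_gpus == 0:
--         return [None] * num_workers  # CPU processing
--     if num_workers <= available_gpus:
--         # round-robin never wraps: each worker gets its own GPU id
--         return list(range(max(num_workers, 0)))
--     # tile one full cycle block q times, then the first r ids
--     q, r = divmod(num_workers, available_gpus)
--     block = list(range(available_gpus))
--     return block * q + block[:r]
-- ===== Notes on version B (the rewrite author's own statement) =====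
-- stated objective: alternative
-- what changed: Replaces the per-element 'i % available_gpus' append loop by computing one cycle block once and shaping the answer by block replication (divmod) plus a slice for the remainder, with a direct range() when the round-robin never wraps.
-- outside the precondition, e.g. on get_gpu_assignments(3, -2): A returns [0, -1, 0], B returns []
import Mathlib
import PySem

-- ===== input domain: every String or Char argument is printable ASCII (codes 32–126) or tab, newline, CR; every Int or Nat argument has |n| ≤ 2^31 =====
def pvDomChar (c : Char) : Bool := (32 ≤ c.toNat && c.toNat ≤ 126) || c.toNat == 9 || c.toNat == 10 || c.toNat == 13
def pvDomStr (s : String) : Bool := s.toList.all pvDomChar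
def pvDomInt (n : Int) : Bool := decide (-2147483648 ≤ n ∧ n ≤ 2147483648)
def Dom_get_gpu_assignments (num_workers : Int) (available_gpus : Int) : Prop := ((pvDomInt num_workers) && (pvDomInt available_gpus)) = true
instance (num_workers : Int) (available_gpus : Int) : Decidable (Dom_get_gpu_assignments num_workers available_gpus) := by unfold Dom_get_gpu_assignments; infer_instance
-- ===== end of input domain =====

-- B replaces A's per-element modulo-append loop by one cycle block shaped with replication + a slice (objective: alternative).

-- ===== PORT A =====
def get_gpu_assignments (num_workers : Int) (available_gpus : Int) : List (Option Int) :=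
  if available_gpus = 0 then
    List.replicate num_workers.toNat none
  else
    (PySem.List.pyRange 0 num_workers 1).foldl
      (fun acc i => acc ++ [some (PySem.Int.mod i available_gpus)]) []

-- ===== PORT B =====
-- Python 'xs * q' for a list and an int (empty when q ≤ 0)
def pvListMul (xs : List (Option Int)) (q : Int) : List (Option Int) :=
  (List.range q.toNat).foldl (fun acc _ => acc ++ xs) []

def get_gpu_assignments_alt (num_workers : Int) (available_gpus : Int) : List (Option Int) :=
  if available_gpus = 0 then
    List.replicate num_workers.toNat none
  else if num_workers ≤ available_gpus then
    (PySem.List.pyRange 0 (max num_workers 0) 1).map some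
  else
    let q := PySem.Int.floordiv num_workers available_gpus
    let r := PySem.Int.mod num_workers available_gpus
    let block := (PySem.List.pyRange 0 available_gpus 1).map some
    pvListMul block q ++ PySem.List.slice block none (some r)

-- ===== PRECONDITION & SPEC =====
-- Pre_ excludes negative available_gpus with a positive worker count, where A's negative
-- floor-mod "GPU ids" are an artefact of its implementation; B returns [] there.
def Pre_get_gpu_assignments (num_workers : Int) (available_gpus : Int) : Prop :=
  0 ≤ available_gpus ∨ num_workers ≤ 0
instance (num_workers : Int) (available_gpus : Int) : Decidable (Pre_get_gpu_assignments num_workers available_gpus) := by unfold Pre_get_gpu_assignments; infer_instance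

def pvWitness_get_gpu_assignments : Int × Int := (7, 3)

def Spec_get_gpu_assignments (num_workers : Int) (available_gpus : Int) (out : List (Option Int)) : Prop := out = get_gpu_assignments_alt num_workers available_gpus
instance (num_workers : Int) (available_gpus : Int) (out : List (Option Int)) : Decidable (Spec_get_gpu_assignments num_workers available_gpus out) := by unfold Spec_get_gpu_assignments; infer_instance

-- ===== CLAIM (what is proved, stated in full; the proofs are below) =====
def Claim_equal_get_gpu_assignments : Prop := ∀ (num_workers : Int) (available_gpus : Int), Dom_get_gpu_assignments num_workers available_gpus → Pre_get_gpu_assignments num_workers available_gpus → Spec_get_gpu_assignments num_workers available_gpus (get_gpu_assignments num_workers available_gpus)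

-- ===== LEMMAS AND PROOFS =====

-- A's loop is a map of floor-mod over range(num_workers)
theorem pvA_eq_map (n g : Int) (hg : g ≠ 0) :
    get_gpu_assignments n g
      = (PySem.List.pyRange 0 n 1).map (fun i => some (PySem.Int.mod i g)) := by
  unfold get_gpu_assignments
  rw [if_neg hg]
  simpa using PySem.List.foldl_append_singleton_eq_map (fun i => some (PySem.Int.mod i g))
    (PySem.List.pyRange 0 n 1) []

-- one period of the modulo pattern starting at a multiple of g is the identity block
theorem pvPeriod (g a m : Int) (hg : 0 < g) (ha : g ∣ a) (_hm0 : 0 ≤ m) (hmg : m ≤ g) :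
    (PySem.List.pyRange a (a + m) 1).map (fun i => some (PySem.Int.mod i g))
      = (PySem.List.pyRange 0 m 1).map some := by
  rw [PySem.List.pyRange_one a (a + m), PySem.List.pyRange_one 0 m]
  simp only [add_sub_cancel_left, sub_zero, List.map_map]
  refine List.map_congr_left (fun k hk => ?_)
  simp only [List.mem_range] at hk
  have hkm : (k : Int) < m := by omega
  obtain ⟨c, hc⟩ := ha
  have hmod : PySem.Int.mod (a + k) g = (k : Int) := by
    rw [PySem.Int.mod_eq_emod_of_pos hg, hc, Int.add_comm, Int.add_mul_emod_self_left]
    exact Int.emod_eq_of_lt (by positivity) (by omega)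
  simp [hmod]

-- an appending foldl factors through the empty accumulator
theorem pvFoldl_acc (xs acc : List (Option Int)) (l : List Nat) :
    List.foldl (fun a _ => a ++ xs) acc l
      = acc ++ List.foldl (fun a _ => a ++ xs) [] l := by
  induction l generalizing acc with
  | nil => simp
  | cons h t ih =>
      simp only [List.foldl_cons, List.nil_append]
      rw [ih (acc ++ xs), ih xs, List.append_assoc]

-- q copies of the block, left-peel form of pvListMul
theorem pvListMul_succ (xs : List (Option Int)) (q : Nat) :
    pvListMul xs ((q : Int) + 1) = xs ++ pvListMul xs (q : Int) := by
  have h1 : ((q : Int) + 1).toNat = q + 1 := by omega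
  have h2 : ((q : Int)).toNat = q := by omega
  simp only [pvListMul, h1, h2, List.range_succ_eq_map, List.foldl_cons, List.foldl_map,
    List.nil_append]
  exact pvFoldl_acc xs xs (List.range q)

-- the tiling identity: range(q*g + r) mapped through i % g is q blocks then the first r ids
theorem pvTile (g : Int) (hg : 0 < g) (q : Nat) (r : Int) (hr0 : 0 ≤ r) (hrg : r ≤ g) :
    (PySem.List.pyRange 0 ((q : Int) * g + r) 1).map (fun i => some (PySem.Int.mod i g))
      = pvListMul ((PySem.List.pyRange 0 g 1).map some) (q : Int)
          ++ (PySem.List.pyRange 0 r 1).map some := by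
  induction q with
  | zero =>
      simpa [pvListMul] using pvPeriod g 0 r hg ⟨0, by ring⟩ hr0 hrg
  | succ k ih =>
      have hsplit : PySem.List.pyRange 0 (((k : Int) + 1) * g + r) 1
          = PySem.List.pyRange 0 g 1 ++ PySem.List.pyRange g (((k : Int) + 1) * g + r) 1 :=
        PySem.List.pyRange_one_append 0 g _ (le_of_lt hg) (by nlinarith [Int.natCast_nonneg k])
      have hshift : (PySem.List.pyRange g (((k : Int) + 1) * g + r) 1).map
            (fun i => some (PySem.Int.mod i g))
          = (PySem.List.pyRange 0 ((k : Int) * g + r) 1).map (fun i => some (PySem.Int.mod i g)) := by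
        rw [PySem.List.pyRange_one g _, PySem.List.pyRange_one 0 _]
        have he : ((k : Int) + 1) * g + r - g = (k : Int) * g + r - 0 := by ring
        rw [he]
        simp only [List.map_map]
        refine List.map_congr_left (fun j hj => ?_)
        simp only [Function.comp_apply]
        congr 1
        rw [PySem.Int.mod_eq_emod_of_pos hg, PySem.Int.mod_eq_emod_of_pos hg,
          Int.add_emod_left]
        simp
      have hblock : (PySem.List.pyRange 0 g 1).map (fun i => some (PySem.Int.mod i g))
          = (PySem.List.pyRange 0 g 1).map some := by
        simpa using pvPeriod g 0 g hg ⟨0, by ring⟩ (le_of_lt hg) le_rfl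
      push_cast
      rw [hsplit, List.map_append, hshift, ih, hblock, pvListMul_succ]
      simp [List.append_assoc]

-- a slice of the empty list is empty
theorem pvSlice_nil (a b : Option Int) :
    PySem.List.slice ([] : List (Option Int)) a b = [] := by
  cases a <;> cases b <;> simp [PySem.List.slice]

-- the first r elements of the block are range(r)
theorem pvTake_block (g r : Int) (hg : 0 < g) (hr0 : 0 ≤ r) (hrg : r ≤ g) :
    PySem.List.slice ((PySem.List.pyRange 0 g 1).map some) none (some r)
      = (PySem.List.pyRange 0 r 1).map some := by
  rw [PySem.List.slice_to _ hr0, ← List.map_take]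
  congr 1
  rw [PySem.List.pyRange_one 0 g, PySem.List.pyRange_one 0 r, ← List.map_take, List.take_range]
  congr 2
  omega

-- ===== VERDICT (by name: the statement is the Claim_ definition above) =====
theorem get_gpu_assignments_spec : Claim_equal_get_gpu_assignments := by
  intro n g _ hpre
  unfold Spec_get_gpu_assignments
  by_cases hg' : 0 ≤ g
  swap
  · -- negative available_gpus, so num_workers ≤ 0: both sides are []
    have hn : n ≤ 0 := hpre.resolve_left hg'
    have hgne : g ≠ 0 := by omega
    have hA : get_gpu_assignments n g = [] := by
      rw [pvA_eq_map n g hgne, PySem.List.pyRange_one_eq_nil (by omega : n ≤ 0)]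
      rfl
    have hblock : PySem.List.pyRange 0 g 1 = [] :=
      PySem.List.pyRange_one_eq_nil (by omega : g ≤ 0)
    rw [hA, get_gpu_assignments_alt]
    rw [if_neg hgne]
    by_cases hng : n ≤ g
    · rw [if_pos hng, PySem.List.pyRange_one_eq_nil (by omega : max n 0 ≤ 0)]
      rfl
    · rw [if_neg hng]
      simp [hblock, pvListMul, pvSlice_nil]
  rcases eq_or_lt_of_le hg' with hg0 | hg
  · -- g = 0
    simp [get_gpu_assignments, get_gpu_assignments_alt, ← hg0]
  · -- g > 0
    have hgne : g ≠ 0 := ne_of_gt hg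
    rw [pvA_eq_map n g hgne]
    by_cases hng : n ≤ g
    · -- no wrap: every i in range(n) satisfies i % g = i
      rw [get_gpu_assignments_alt]
      simp only [hgne, if_false, hng, if_true]
      by_cases hn0 : 0 ≤ n
      · have hmax : max n 0 = n := by omega
        rw [hmax]
        simpa using pvPeriod g 0 n hg ⟨0, by ring⟩ hn0 hng
      · have hmax : max n 0 = 0 := by omega
        rw [hmax, PySem.List.pyRange_one_eq_nil (by omega : n ≤ 0),
          PySem.List.pyRange_one_eq_nil le_rfl]
        simp
    · -- wrap: n > g, tile q blocks and the remainder
      rw [not_le] at hng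
      rw [get_gpu_assignments_alt]
      simp only [hgne, if_false, not_le.mpr hng, if_false]
      set q := PySem.Int.floordiv n g with hq
      set r := PySem.Int.mod n g with hr
      have hdec : q * g + r = n := PySem.Int.floordiv_mul_add_mod n g
      have hr0 : 0 ≤ r := PySem.Int.mod_nonneg n hg
      have hrg : r < g := PySem.Int.mod_lt n hg
      have hq0 : 0 ≤ q := by nlinarith
      have hqn : q = ((q.toNat : Nat) : Int) := by omega
      have htile := pvTile g hg q.toNat r hr0 (le_of_lt hrg)
      rw [← hqn, hdec] at htile
      rw [htile, pvTake_block g r hg hr0 (le_of_lt hrg)]
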